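-- pv_equiv track=rewrite | github.com/syameimaruhin/Dadi-Corpus-Segmentation | 09_Fleiss_Kappa_Adjudication.py | extract_boundaries
-- ===== SOURCE A (Python) =====
-- def extract_boundaries(segmented_text, variant_map):
--     """
--     Converts segmented text into a character sequence (with variant normalization applied)
--     and a sequence of boundary labels.
--     Label '1' indicates the end of a word (boundary), '0' indicates within a word.
--     """
--     tokens = segmented_text.split()
--     chars = []
--     boundaries = []
--
--     for token in tokens:
--         for i, char in enumerate(token):
--             # Apply variant character normalization mapping
--             normalized_char = variant_map.get(char, char)
--             chars.append(normalized_char)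
--
--             # If it's the last character of the token, mark as a boundary (1)
--             if i == len(token) - 1:
--                 boundaries.append(1)
--             else:
--                 boundaries.append(0)
--
--     return "".join(chars), boundaries
-- ===== SOURCE B (Python) =====
-- def extract_boundaries(segmented_text, variant_map):
--     """Single left-to-right scan of the raw text with one-character lookahead:
--     no split(), no tokens. A non-whitespace character is emitted (normalized via
--     variant_map) and labelled 1 exactly when it is the last character of the text
--     or the next character is whitespace; whitespace characters are skipped."""
--     chars = []
--     boundaries = []
--     n = len(segmented_text)
--     for i, c in enumerate(segmented_text):
--         if not c.isspace():
--             chars.append(variant_map.get(c, c))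
--             boundaries.append(1 if i + 1 == n or segmented_text[i + 1].isspace() else 0)
--     return "".join(chars), boundaries
-- ===== Notes on version B (the rewrite author's own statement) =====
-- stated objective: alternative
-- what changed: Drops the split()-into-tokens pass entirely: B makes a single left-to-right scan of the raw text with one-character lookahead, skipping whitespace and labelling a character 1 exactly when the next character is whitespace or the text ends.
import Mathlib
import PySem

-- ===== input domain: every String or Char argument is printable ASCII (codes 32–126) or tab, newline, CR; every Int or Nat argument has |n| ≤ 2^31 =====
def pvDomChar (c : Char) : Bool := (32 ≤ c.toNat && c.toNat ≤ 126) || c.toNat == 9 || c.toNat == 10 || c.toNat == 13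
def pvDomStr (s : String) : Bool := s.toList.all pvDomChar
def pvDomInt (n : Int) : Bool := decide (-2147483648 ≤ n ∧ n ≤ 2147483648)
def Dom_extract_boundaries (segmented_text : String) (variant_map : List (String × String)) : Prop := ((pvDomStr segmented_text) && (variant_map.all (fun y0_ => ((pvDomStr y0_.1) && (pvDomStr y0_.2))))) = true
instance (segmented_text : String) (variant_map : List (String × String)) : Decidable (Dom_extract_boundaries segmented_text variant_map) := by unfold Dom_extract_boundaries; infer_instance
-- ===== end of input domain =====

-- B replaces A's split-into-tokens + per-character enumerate/last-index loop by a single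
-- left-to-right scan of the raw text with one-character lookahead (no tokenization): simpler.


-- ===== PORT A =====
-- variant_map.get(char, char), shared by both ports
def ebNorm (variant_map : List (String × String)) (c : Char) : String :=
  PySem.Dict.getD (PySem.Dict.mk variant_map) (String.ofList [c]) (String.ofList [c])

def extract_boundaries (segmented_text : String) (variant_map : List (String × String)) : String × List Int :=
  let tokens := PySem.Str.split₀ segmented_text
  let res := tokens.foldl
    (fun (acc : List String × List Int) token =>
      (PySem.List.enumerate token.toList).foldl
        (fun (acc : List String × List Int) p =>
          -- normalized_char = variant_map.get(char, char); chars.append(normalized_char)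
          -- then boundaries.append(1 if i == len(token)-1 else 0)
          (acc.1 ++ [ebNorm variant_map p.2],
           acc.2 ++ [if p.1 = PySem.Str.len token - 1 then (1 : Int) else 0]))
        acc)
    (([] : List String), ([] : List Int))
  (PySem.Str.join "" res.1, res.2)

-- ===== PORT B =====
-- Source B's single scan as structural recursion: skip whitespace; otherwise emit the
-- normalized char and the label from the one-character lookahead (t[i+1] = head of rest).
def ebScan (variant_map : List (String × String)) : List Char → List String × List Int
  | [] => ([], [])
  | c :: rest =>
    if PySem.Chars.isspace c then ebScan variant_map rest
    else
      let r := ebScan variant_map rest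
      let b : Int := match rest with
        | [] => 1
        | c' :: _ => if PySem.Chars.isspace c' then 1 else 0
      (ebNorm variant_map c :: r.1, b :: r.2)

def extract_boundaries_alt (segmented_text : String) (variant_map : List (String × String)) : String × List Int :=
  let r := ebScan variant_map segmented_text.toList
  (PySem.Str.join "" r.1, r.2)

-- ===== PRECONDITION & SPEC =====
def Spec_extract_boundaries (segmented_text : String) (variant_map : List (String × String)) (out : String × List Int) : Prop := out = extract_boundaries_alt segmented_text variant_map
instance (segmented_text : String) (variant_map : List (String × String)) (out : String × List Int) : Decidable (Spec_extract_boundaries segmented_text variant_map out) := by unfold Spec_extract_boundaries; infer_instance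

-- ===== CLAIM (what is proved, stated in full; the proofs are below) =====
def Claim_equal_extract_boundaries : Prop := ∀ (segmented_text : String) (variant_map : List (String × String)), Dom_extract_boundaries segmented_text variant_map → Spec_extract_boundaries segmented_text variant_map (extract_boundaries segmented_text variant_map)

-- ===== LEMMAS AND PROOFS =====

-- every piece produced by split() is a nonempty string
theorem split₀_go_ne_nil (s : List Char) : ∀ (cur : List Char) (acc : List (List Char)),
    (∀ t ∈ acc, t ≠ []) → ∀ t ∈ PySem.Chars.split₀.go s cur acc, t ≠ [] := by
  induction s with
  | nil =>
      intro cur acc hacc t ht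
      simp only [PySem.Chars.split₀.go] at ht
      by_cases hc : cur.isEmpty
      · simp [hc] at ht; exact hacc t (by simpa using ht)
      · simp [hc, List.mem_reverse] at ht
        rcases ht with h | h
        all_goals first
          | exact hacc t h
          | (subst h; simpa [List.isEmpty_iff] using hc)
  | cons c rest ih =>
      intro cur acc hacc t ht
      simp only [PySem.Chars.split₀.go] at ht
      by_cases hs : PySem.Chars.isspace c
      · by_cases hc : cur.isEmpty
        · simp [hs, hc] at ht; exact ih [] acc hacc t ht
        · simp [hs, hc] at ht
          refine ih [] (cur.reverse :: acc) ?_ t ht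
          intro u hu
          rcases List.mem_cons.mp hu with hu | hu
          all_goals first
            | exact hacc u hu
            | (subst hu; simpa [List.isEmpty_iff] using hc)
      · simp [hs] at ht; exact ih (c :: cur) acc hacc t ht

theorem mem_split₀_ne_nil (s : String) : ∀ t ∈ PySem.Str.split₀ s, t.toList ≠ [] := by
  intro t ht
  simp only [PySem.Str.split₀, List.mem_map] at ht
  obtain ⟨cs, hcs, rfl⟩ := ht
  have := split₀_go_ne_nil s.toList [] [] (by simp) cs hcs
  simpa using this

-- the inner enumerate loop of A, in closed form
theorem innerA (f : Char → String) (n : Int) :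
    ∀ (cs : List Char) (k : Int) (a : List String) (b : List Int),
      cs ≠ [] → n = k + cs.length - 1 →
      (PySem.List.enumerate cs k).foldl
        (fun (acc : List String × List Int) p =>
          (acc.1 ++ [f p.2], acc.2 ++ [if p.1 = n then (1 : Int) else 0])) (a, b)
      = (a ++ cs.map f, b ++ (List.replicate (cs.length - 1) (0 : Int) ++ [1])) := by
  intro cs
  induction cs with
  | nil => intro k a b h; exact absurd rfl h
  | cons c rest ih =>
      intro k a b _ hn
      cases rest with
      | nil =>
          have hkn : k = n := by simp at hn; omega
          simp [PySem.List.enumerate, hkn]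
      | cons c' rest' =>
          have hkn : ¬ (k = n) := by simp at hn; omega
          have hrest : (c' :: rest') ≠ ([] : List Char) := by simp
          have hn' : n = (k + 1) + (c' :: rest').length - 1 := by simp at hn ⊢; omega
          rw [show PySem.List.enumerate (c :: c' :: rest') k
                = (k, c) :: PySem.List.enumerate (c' :: rest') (k + 1) from rfl]
          rw [List.foldl_cons]
          simp only [if_neg hkn]
          rw [ih (k + 1) (a ++ [f c]) (b ++ [(0 : Int)]) hrest hn']
          simp [List.replicate_succ]

-- the outer token loop of A, in closed form
theorem outerA (f : Char → String) :
    ∀ (tokens : List String), (∀ t ∈ tokens, t.toList ≠ []) →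
      ∀ (a : List String) (b : List Int),
      tokens.foldl
        (fun (acc : List String × List Int) token =>
          (PySem.List.enumerate token.toList).foldl
            (fun (acc : List String × List Int) p =>
              (acc.1 ++ [f p.2], acc.2 ++ [if p.1 = PySem.Str.len token - 1 then (1 : Int) else 0]))
            acc) (a, b)
      = (a ++ tokens.flatMap (fun t => t.toList.map f),
         b ++ tokens.flatMap (fun t => List.replicate (t.toList.length - 1) (0 : Int) ++ [1])) := by
  intro tokens
  induction tokens with
  | nil => intro _ a b; simp
  | cons t ts ih =>
      intro h a b
      have ht : t.toList ≠ [] := h t (by simp)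
      simp only [List.foldl_cons]
      rw [show (PySem.Str.len t - 1) = 0 + (t.toList.length : Int) - 1 by simp [PySem.Str.len]] at *
      rw [innerA f (0 + (t.toList.length : Int) - 1) t.toList 0 a b ht rfl]
      rw [ih (fun u hu => h u (by simp [hu])) _ _]
      simp [List.flatMap_cons, List.append_assoc]

-- the boundary labels contributed by a pending partial token cur (reversed) given the rest s
def pendBnd (s cur : List Char) : List Int :=
  if cur = [] then []
  else match s with
    | [] => List.replicate (cur.length - 1) (0 : Int) ++ [1]
    | c :: _ => if PySem.Chars.isspace c then List.replicate (cur.length - 1) (0 : Int) ++ [1]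
                else List.replicate cur.length (0 : Int)

-- go with an accumulator just prepends the accumulated (reversed) tokens
theorem go_acc (s : List Char) : ∀ (cur : List Char) (acc : List (List Char)),
    PySem.Chars.split₀.go s cur acc = acc.reverse ++ PySem.Chars.split₀.go s cur [] := by
  induction s with
  | nil =>
      intro cur acc
      by_cases hc : cur.isEmpty <;> simp [PySem.Chars.split₀.go, hc]
  | cons c rest ih =>
      intro cur acc
      by_cases hs : PySem.Chars.isspace c
      · by_cases hc : cur.isEmpty
        · simp only [PySem.Chars.split₀.go, hs, hc, if_true]
          exact ih [] acc
        · simp only [PySem.Chars.split₀.go, hs, hc, if_true, if_false, Bool.false_eq_true]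
          rw [ih [] (cur.reverse :: acc), ih [] [cur.reverse]]
          simp
      · simp only [PySem.Chars.split₀.go, hs, Bool.false_eq_true, if_false]
        exact ih (c :: cur) acc

-- the split-then-flatten view of A equals B's single scan, generalized over a pending token
theorem go_scan (vm : List (String × String)) (s : List Char) : ∀ (cur : List Char),
    ((PySem.Chars.split₀.go s cur []).flatMap (fun cs => cs.map (ebNorm vm)),
     (PySem.Chars.split₀.go s cur []).flatMap
       (fun cs => List.replicate (cs.length - 1) (0 : Int) ++ [1]))
    = (cur.reverse.map (ebNorm vm) ++ (ebScan vm s).1,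
       pendBnd s cur ++ (ebScan vm s).2) := by
  induction s with
  | nil =>
      intro cur
      by_cases hc : cur = []
      · subst hc; simp [PySem.Chars.split₀.go, ebScan, pendBnd]
      · have : cur.isEmpty = false := by simpa [List.isEmpty_iff] using hc
        simp [PySem.Chars.split₀.go, this, ebScan, pendBnd, hc]
  | cons c rest ih =>
      intro cur
      by_cases hs : PySem.Chars.isspace c
      · -- whitespace: close the pending token (if any) and continue
        by_cases hc : cur = []
        · subst hc
          simp only [PySem.Chars.split₀.go, hs, if_true, List.isEmpty_nil]
          simpa [ebScan, hs, pendBnd] using ih []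
        · have hce : cur.isEmpty = false := by simpa [List.isEmpty_iff] using hc
          simp only [PySem.Chars.split₀.go, hs, if_true, hce, Bool.false_eq_true, if_false]
          rw [go_acc rest [] [cur.reverse]]
          have h0 := ih []
          simp only [pendBnd, List.reverse_nil, List.map_nil, List.nil_append, reduceIte,
            Prod.mk.injEq] at h0
          rw [Prod.ext_iff]
          obtain ⟨h1, h2⟩ := h0
          constructor
          · simp [h1, ebScan, hs]
          · simp [h2, ebScan, hs, pendBnd, hc]
      · -- non-whitespace: extend the pending token / emit c in the scan
        simp only [PySem.Chars.split₀.go, hs, Bool.false_eq_true, if_false]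
        have h := ih (c :: cur)
        rw [Prod.ext_iff] at h ⊢
        constructor
        · rw [h.1]
          simp [ebScan, hs]
        · rw [h.2]
          simp only [ebScan, hs, Bool.false_eq_true, if_false]
          cases rest with
          | nil =>
              cases cur <;> simp [pendBnd, hs, List.replicate_succ']
          | cons c' rest' =>
              by_cases hs' : PySem.Chars.isspace c'
              · cases cur <;> simp [pendBnd, hs, hs', List.replicate_succ']
              · cases cur <;> simp [pendBnd, hs, hs', List.replicate_succ']

theorem extract_boundaries_eq (segmented_text : String) (variant_map : List (String × String)) :
    extract_boundaries segmented_text variant_map = extract_boundaries_alt segmented_text variant_map := by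
  simp only [extract_boundaries, extract_boundaries_alt]
  rw [outerA (ebNorm variant_map) (PySem.Str.split₀ segmented_text)
        (mem_split₀_ne_nil segmented_text) [] []]
  have h := go_scan variant_map segmented_text.toList []
  simp only [pendBnd, List.reverse_nil, List.map_nil, List.nil_append, reduceIte,
    Prod.mk.injEq] at h
  simp only [PySem.Str.split₀, PySem.Chars.split₀, List.flatMap_map, String.toList_ofList,
    List.nil_append]
  rw [h.1, h.2]

-- ===== VERDICT (by name: the statement is the Claim_ definition above) =====
theorem extract_boundaries_spec : Claim_equal_extract_boundaries := by
  intro s vm _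
  unfold Spec_extract_boundaries
  exact extract_boundaries_eq s vm
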